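-- pv_equiv track=rewrite | github.com/liziye627-design/aletheia-design | core-components/aletheia-backend/services/comments/spam_scorer.py | _cluster_by_simhash
-- ===== SOURCE A (Python) =====
-- from typing import Any, Dict, List, Optional, Tuple
--
-- def _hamming(a: int, b: int) -> int:
--     return (a ^ b).bit_count()
--
-- def _cluster_by_simhash(hashes: List[int], max_dist: int) -> List[int]:
--     cluster_ids = [-1] * len(hashes)
--     cluster = 0
--     for i, h in enumerate(hashes):
--         if cluster_ids[i] >= 0:
--             continue
--         cluster_ids[i] = cluster
--         for j in range(i + 1, len(hashes)):
--             if cluster_ids[j] >= 0: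
--                 continue
--             if _hamming(h, hashes[j]) <= max_dist:
--                 cluster_ids[j] = cluster
--         cluster += 1
--     return cluster_ids
-- ===== SOURCE B (Python) =====
-- def _hamming(a: int, b: int) -> int:
--     return (a ^ b).bit_count()
--
-- def _cluster_by_simhash(hashes, max_dist):
--     leaders = []  # list of (hash, cluster_id)
--     result = []
--     for h in hashes:
--         cid = next((c for (l, c) in leaders if _hamming(h, l) <= max_dist), None)
--         if cid is None:
--             cid = len(leaders)
--             leaders.append((h, cid))
--         result.append(cid)
--     return result
-- ===== Notes on version B (the rewrite author's own statement) =====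
-- stated objective: simpler
-- what changed: A marks all later elements of the array from each new leader via nested index scans over cluster_ids; B makes a single forward pass that maintains only a list of (leader, cluster_id) pairs and assigns each element the id of its first matching leader, appending a new leader when none matches.
import Mathlib
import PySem

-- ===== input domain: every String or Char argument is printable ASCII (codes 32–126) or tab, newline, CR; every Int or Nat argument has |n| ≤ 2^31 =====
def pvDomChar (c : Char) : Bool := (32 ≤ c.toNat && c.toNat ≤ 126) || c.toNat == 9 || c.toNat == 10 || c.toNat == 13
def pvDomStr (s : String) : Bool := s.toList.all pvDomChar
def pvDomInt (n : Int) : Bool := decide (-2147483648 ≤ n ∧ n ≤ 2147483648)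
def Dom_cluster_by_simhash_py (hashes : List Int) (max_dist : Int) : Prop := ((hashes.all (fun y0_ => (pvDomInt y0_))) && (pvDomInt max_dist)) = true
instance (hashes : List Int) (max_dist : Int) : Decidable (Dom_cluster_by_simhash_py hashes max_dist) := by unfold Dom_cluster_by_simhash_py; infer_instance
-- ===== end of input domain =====

-- B replaces A's in-place marking of all later elements by each new leader (nested index scans
-- over the whole array) with a single forward pass that maintains only a list of cluster leaders
-- and assigns each element the id of its first matching leader (objective: simpler).

-- ===== PORT A =====
-- _hamming(a, b) = (a ^ b).bit_count()
def pvHam (a b : Int) : Int := ((PySem.Int.bitCount (PySem.Int.bxor a b) : Nat) : Int)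

-- inner loop 'for j in range(i + 1, len(hashes)): …'
def pvInnerA (hashes : List Int) (max_dist h cluster : Int) (js : List Int) (ids : List Int) : List Int :=
  js.foldl (fun ids j =>
    if 0 ≤ PySem.List.pyGetD ids j (-1) then ids
    else if pvHam h (PySem.List.pyGetD hashes j 0) ≤ max_dist then PySem.List.pySetD ids j cluster
    else ids) ids

def cluster_by_simhash_py (hashes : List Int) (max_dist : Int) : List Int :=
  ((PySem.List.enumerate hashes 0).foldl (fun (st : List Int × Int) p =>
      if 0 ≤ PySem.List.pyGetD st.1 p.1 (-1) then st
      else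
        let ids := PySem.List.pySetD st.1 p.1 st.2
        let ids := pvInnerA hashes max_dist p.2 st.2
          (PySem.List.pyRange (p.1 + 1) (hashes.length : Int) 1) ids
        (ids, st.2 + 1))
    (List.replicate hashes.length (-1), 0)).1

-- ===== PORT B =====
-- the loop of Source B: walk the elements once, carrying the leaders list
def pvGoB (max_dist : Int) : List Int → List (Int × Int) → List Int
  | [], _ => []
  | h :: t, leaders =>
    match leaders.find? (fun lc => pvHam h lc.1 ≤ max_dist) with
    | some lc => lc.2 :: pvGoB max_dist t leaders
    | none => (leaders.length : Int) :: pvGoB max_dist t (leaders ++ [(h, (leaders.length : Int))])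

def cluster_by_simhash_py_alt (hashes : List Int) (max_dist : Int) : List Int :=
  pvGoB max_dist hashes []

-- ===== PRECONDITION & SPEC =====
def Spec_cluster_by_simhash_py (hashes : List Int) (max_dist : Int) (out : List Int) : Prop := out = cluster_by_simhash_py_alt hashes max_dist
instance (hashes : List Int) (max_dist : Int) (out : List Int) : Decidable (Spec_cluster_by_simhash_py hashes max_dist out) := by unfold Spec_cluster_by_simhash_py; infer_instance

-- ===== CLAIM (what is proved, stated in full; the proofs are below) =====
def Claim_equal_cluster_by_simhash_py : Prop := ∀ (hashes : List Int) (max_dist : Int), Dom_cluster_by_simhash_py hashes max_dist → Spec_cluster_by_simhash_py hashes max_dist (cluster_by_simhash_py hashes max_dist)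

-- ===== LEMMAS AND PROOFS =====

-- the id the leaders list L gives to an element h (-1 if no leader is within max_dist)
def pvMatch (d : Int) (L : List (Int × Int)) (h : Int) : Int :=
  match L.find? (fun lc => pvHam h lc.1 ≤ d) with
  | some lc => lc.2
  | none => -1

lemma pvMatch_append (d : Int) (L M : List (Int × Int)) (h : Int)
    (hnone : L.find? (fun lc => pvHam h lc.1 ≤ d) = none) :
    pvMatch d (L ++ M) h = pvMatch d M h := by
  simp [pvMatch, List.find?_append, hnone]

lemma pvMatch_append_of_some (d : Int) (L M : List (Int × Int)) (h : Int) {lc : Int × Int}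
    (hsome : L.find? (fun lc => pvHam h lc.1 ≤ d) = some lc) :
    pvMatch d (L ++ M) h = lc.2 := by
  simp [pvMatch, List.find?_append, hsome]

lemma pvHam_comm (a b : Int) : pvHam a b = pvHam b a := by
  simp [pvHam, PySem.Int.bxor_comm]

lemma pvTake_eq_of_getD (xs ys : List Int) (k : Nat)
    (hlen : xs.length = ys.length)
    (hag : ∀ j : Nat, j < k → xs.getD j (-1) = ys.getD j (-1)) :
    xs.take k = ys.take k := by
  apply List.ext_getElem
  · simp [hlen]
  · intro j h1 h2
    have hjx : j < xs.length := by simp at h1; omega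
    have hjy : j < ys.length := by simp at h2; omega
    have hjk : j < k := by simp at h1; omega
    have := hag j hjk
    rw [List.getD_eq_getElem _ _ hjx, List.getD_eq_getElem _ _ hjy] at this
    simpa [List.getElem_take] using this

-- the inner marking pass of A realises the leader list L ++ [(h, c)] on positions ≥ i
lemma pvInner_spec (hashes : List Int) (d h c : Int) (L : List (Int × Int))
    (HL : ∀ lc ∈ L, 0 ≤ lc.2) :
    ∀ (fuel : Nat) (i : Nat) (ids : List Int),
    i + fuel = hashes.length →
    ids.length = hashes.length →
    (∀ j : Nat, i ≤ j → j < hashes.length → ids.getD j (-1) = pvMatch d L (hashes.getD j 0)) →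
    (pvInnerA hashes d h c (PySem.List.pyRange (i : Int) (hashes.length : Int) 1) ids).length = hashes.length ∧
    (∀ j : Nat, j < i → (pvInnerA hashes d h c (PySem.List.pyRange (i : Int) (hashes.length : Int) 1) ids).getD j (-1) = ids.getD j (-1)) ∧
    (∀ j : Nat, i ≤ j → j < hashes.length →
      (pvInnerA hashes d h c (PySem.List.pyRange (i : Int) (hashes.length : Int) 1) ids).getD j (-1)
        = pvMatch d (L ++ [(h, c)]) (hashes.getD j 0)) := by
  intro fuel
  induction fuel with
  | zero =>
    intro i ids hi hlen hinv
    rw [PySem.List.pyRange_one_eq_nil (by omega)]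
    refine ⟨hlen, fun j _ => rfl, fun j hij hjn => ?_⟩
    omega
  | succ f IH =>
    intro i ids hi hlen hinv
    have hin : i < hashes.length := by omega
    rw [PySem.List.pyRange_one_cons (by exact_mod_cast hin)]
    have hcast : ((i : Int) + 1) = ((i + 1 : Nat) : Int) := by push_cast; ring
    rw [hcast]
    simp only [pvInnerA, List.foldl_cons]
    rw [PySem.List.pyGetD_natCast]
    rw [hinv i (le_refl i) hin]
    -- the value at i is pvMatch d L h_i; split on whether some leader of L matches h_i
    rcases hfind : L.find? (fun lc => pvHam (hashes.getD i 0) lc.1 ≤ d) with _ | lc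
    · -- no leader of L matches position i
      have hm : pvMatch d L (hashes.getD i 0) = -1 := by unfold pvMatch; rw [hfind]
      rw [hm]
      simp only [show ¬ (0:Int) ≤ -1 by omega, if_false]
      rw [PySem.List.pyGetD_natCast]
      by_cases hham : pvHam h (hashes.getD i 0) ≤ d
      · -- marked with c: position i now matches the new leader (h, c)
        simp only [hham, if_true]
        have hlen2 : (PySem.List.pySetD ids (i : Int) c).length = hashes.length := by
          rw [PySem.List.length_pySetD]; exact hlen
        have hinv2 : ∀ j : Nat, i + 1 ≤ j → j < hashes.length →
            (PySem.List.pySetD ids (i : Int) c).getD j (-1) = pvMatch d L (hashes.getD j 0) := by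
          intro j hij hjn
          rw [← PySem.List.pyGetD_natCast,
            PySem.List.pyGetD_pySetD_natCast ids i j c (-1) (by omega)]
          rw [if_neg (by omega), PySem.List.pyGetD_natCast]
          exact hinv j (by omega) hjn
        obtain ⟨H1, H2, H3⟩ := IH (i + 1) (PySem.List.pySetD ids (i : Int) c) (by omega) hlen2 hinv2
        unfold pvInnerA at H1 H2 H3
        refine ⟨H1, fun j hji => ?_, fun j hij hjn => ?_⟩
        · rw [H2 j (by omega), ← PySem.List.pyGetD_natCast,
            PySem.List.pyGetD_pySetD_natCast ids i j c (-1) (by omega),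
            if_neg (by omega), PySem.List.pyGetD_natCast]
        · rcases Nat.eq_or_lt_of_le hij with rfl | hji
          · rw [H2 i (by omega), ← PySem.List.pyGetD_natCast,
              PySem.List.pyGetD_pySetD_natCast ids i i c (-1) (by omega), if_pos rfl]
            rw [pvMatch_append d L _ _ hfind]
            have hc2 : pvHam (hashes.getD i 0) h ≤ d := by rwa [pvHam_comm]
            unfold pvMatch
            have hb : pvHam (hashes[i]?.getD 0) h ≤ d := by simpa [List.getD] using hc2
            simp [hb]
          · exact H3 j hji hjn
      · -- not within max_dist of the new leader either: stays -1 = pvMatch of L ++ [(h,c)]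
        simp only [hham, if_false]
        obtain ⟨H1, H2, H3⟩ := IH (i + 1) ids (by omega) hlen (fun j hij hjn => hinv j (by omega) hjn)
        unfold pvInnerA at H1 H2 H3
        refine ⟨H1, fun j hji => H2 j (by omega), fun j hij hjn => ?_⟩
        rcases Nat.eq_or_lt_of_le hij with rfl | hji
        · rw [H2 i (by omega), hinv i (le_refl i) hjn, hm, pvMatch_append d L _ _ hfind]
          have hc2 : ¬ pvHam (hashes.getD i 0) h ≤ d := by rwa [pvHam_comm]
          unfold pvMatch
          have hb : ¬ pvHam (hashes[i]?.getD 0) h ≤ d := by simpa [List.getD] using hc2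
          simp [hb]
        · exact H3 j hji hjn
    · -- some leader lc of L already matches position i: skipped, and L ++ [(h,c)] gives the same id
      have hm : pvMatch d L (hashes.getD i 0) = lc.2 := by unfold pvMatch; rw [hfind]
      rw [hm]
      have hpos : 0 ≤ lc.2 := HL lc (List.mem_of_find?_eq_some hfind)
      simp only [if_pos hpos]
      obtain ⟨H1, H2, H3⟩ := IH (i + 1) ids (by omega) hlen (fun j hij hjn => hinv j (by omega) hjn)
      unfold pvInnerA at H1 H2 H3
      refine ⟨H1, fun j hji => H2 j (by omega), fun j hij hjn => ?_⟩
      rcases Nat.eq_or_lt_of_le hij with rfl | hji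
      · rw [H2 i (by omega), hinv i (le_refl i) hjn, hm, pvMatch_append_of_some d L _ _ hfind]
      · exact H3 j hji hjn

-- main invariant: the outer loop of A, run from position i with marks matching leaders L,
-- produces exactly B's output on the remaining suffix
lemma pvOuter_spec (hashes : List Int) (d : Int) :
    ∀ (t : List Int) (i : Nat) (ids : List Int) (L : List (Int × Int)),
    hashes.drop i = t →
    ids.length = hashes.length →
    (∀ lc ∈ L, 0 ≤ lc.2) →
    (∀ j : Nat, i ≤ j → j < hashes.length → ids.getD j (-1) = pvMatch d L (hashes.getD j 0)) →
    ((PySem.List.enumerate t (i : Int)).foldl (fun (st : List Int × Int) p =>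
      if 0 ≤ PySem.List.pyGetD st.1 p.1 (-1) then st
      else
        let ids := PySem.List.pySetD st.1 p.1 st.2
        let ids := pvInnerA hashes d p.2 st.2
          (PySem.List.pyRange (p.1 + 1) (hashes.length : Int) 1) ids
        (ids, st.2 + 1)) (ids, (L.length : Int))).1
      = ids.take i ++ pvGoB d t L := by
  intro t
  induction t with
  | nil =>
    intro i ids L hdrop hlen _ _
    have hle : ids.length ≤ i := by
      have := congrArg List.length hdrop
      simp at this
      omega
    simp [pvGoB, List.take_of_length_le hle]
  | cons h t' IH =>
    intro i ids L hdrop hlen HL hinv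
    have hlt : i < hashes.length := by
      have := congrArg List.length hdrop
      simp at this
      omega
    have hsplit := List.drop_eq_getElem_cons hlt
    rw [hdrop] at hsplit
    have hgi : hashes.getD i 0 = h := by
      rw [List.getD_eq_getElem _ _ hlt]
      exact (List.cons.injEq .. ▸ hsplit).1.symm
    have hdrop' : hashes.drop (i + 1) = t' := ((List.cons.injEq .. ▸ hsplit).2).symm
    rw [PySem.List.enumerate_cons, List.foldl_cons]
    have hcast : ((i : Int) + 1) = ((i + 1 : Nat) : Int) := by push_cast; ring
    simp only [PySem.List.pyGetD_natCast]
    rw [hinv i (le_refl i) hlt, hgi]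
    rcases hfind : L.find? (fun lc => pvHam h lc.1 ≤ d) with _ | lc
    · -- h is a new leader
      have hm : pvMatch d L h = -1 := by unfold pvMatch; rw [hfind]
      rw [hm]
      simp only [show ¬ (0:Int) ≤ -1 by omega, if_false]
      set c : Int := (L.length : Int) with hc
      have hlen2 : (PySem.List.pySetD ids (i : Int) c).length = hashes.length := by
        rw [PySem.List.length_pySetD]; exact hlen
      have hinv2 : ∀ j : Nat, i + 1 ≤ j → j < hashes.length →
          (PySem.List.pySetD ids (i : Int) c).getD j (-1) = pvMatch d L (hashes.getD j 0) := by
        intro j hij hjn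
        rw [← PySem.List.pyGetD_natCast,
          PySem.List.pyGetD_pySetD_natCast ids i j c (-1) (by omega),
          if_neg (by omega), PySem.List.pyGetD_natCast]
        exact hinv j (by omega) hjn
      obtain ⟨H1, H2, H3⟩ := pvInner_spec hashes d h c L HL (hashes.length - (i + 1)) (i + 1)
        (PySem.List.pySetD ids (i : Int) c) (by omega) hlen2 hinv2
      rw [hcast]
      set ids3 := pvInnerA hashes d h c (PySem.List.pyRange ((i + 1 : Nat) : Int) (hashes.length : Int) 1)
        (PySem.List.pySetD ids (i : Int) c) with hids3
      have hHL' : ∀ lc ∈ L ++ [(h, c)], 0 ≤ lc.2 := by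
        intro lc hlc
        rcases List.mem_append.mp hlc with hl | hl
        · exact HL lc hl
        · simp at hl; subst hl; positivity
      have hstep := IH (i + 1) ids3 (L ++ [(h, c)]) hdrop' H1 hHL' H3
      have hclen : ((L ++ [(h, c)]).length : Int) = c + 1 := by simp [hc]
      rw [hclen] at hstep
      simp only [hstep]
      have htake : ids3.take (i + 1) = ids.take i ++ [c] := by
        have hi3 : i < ids3.length := by omega
        rw [List.take_succ_eq_append_getElem hi3]
        have hval : ids3[i] = c := by
          rw [← List.getD_eq_getElem ids3 (-1) hi3, H2 i (by omega), ← PySem.List.pyGetD_natCast,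
            PySem.List.pyGetD_pySetD_natCast ids i i c (-1) (by omega), if_pos rfl]
        rw [hval]
        congr 1
        exact pvTake_eq_of_getD ids3 ids i (by omega) (fun j hj => by
          rw [H2 j (by omega), ← PySem.List.pyGetD_natCast,
            PySem.List.pyGetD_pySetD_natCast ids i j c (-1) (by omega),
            if_neg (by omega), PySem.List.pyGetD_natCast])
      rw [htake]
      simp [pvGoB, hfind, hc]
    · -- h joins lc's cluster, nothing is written
      have hm : pvMatch d L h = lc.2 := by unfold pvMatch; rw [hfind]
      rw [hm]
      have hpos : 0 ≤ lc.2 := HL lc (List.mem_of_find?_eq_some hfind)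
      simp only [if_pos hpos]
      rw [hcast]
      have hstep := IH (i + 1) ids L hdrop' hlen HL (fun j hij hjn => hinv j (by omega) hjn)
      simp only [hstep]
      have hi : i < ids.length := by omega
      rw [List.take_succ_eq_append_getElem hi, ← List.getD_eq_getElem ids (-1) hi,
        hinv i (le_refl i) hlt, hgi, hm]
      simp [pvGoB, hfind]

-- ===== VERDICT (by name: the statement is the Claim_ definition above) =====
theorem cluster_by_simhash_py_spec : Claim_equal_cluster_by_simhash_py := by
  intro hashes max_dist _
  unfold Spec_cluster_by_simhash_py cluster_by_simhash_py cluster_by_simhash_py_alt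
  have h := pvOuter_spec hashes max_dist hashes 0 (List.replicate hashes.length (-1)) []
    (by simp) (by simp) (by simp)
    (by intro j _ hj; simp [List.getD, pvMatch])
  simpa using h
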